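-- pv_equiv track=rewrite | github.com/haakon8855/acReinforcementLearning | pole_balancing.py | one_hot_variable
-- ===== SOURCE A (Python) =====
-- def one_hot_variable(rounded_var: int, abs_max: int):
--     """
--     Returns the one-hot encoding of one rounded state variable
--     """
--     vector = [0] * (abs_max * 2 + 1)
--     for i, val in enumerate(range(-abs_max, abs_max + 1)):
--         if rounded_var <= val:
--             vector[i] = 1
--             return vector
--     vector[-1] = 1
--     return vector
-- ===== SOURCE B (Python) =====
-- def one_hot_variable(rounded_var: int, abs_max: int):
--     """
--     Returns the one-hot encoding of one rounded state variable
--     """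
--     vector = [0] * (abs_max * 2 + 1)
--     index = max(0, min(abs_max * 2, rounded_var + abs_max))
--     vector[index] = 1
--     return vector
-- ===== Notes on version B (the rewrite author's own statement) =====
-- stated objective: simpler
-- what changed: B computes the hit position in closed form, index = max(0, min(2*abs_max, rounded_var + abs_max)), instead of scanning range(-abs_max, abs_max+1) with an early return and a last-element fallback.
import Mathlib
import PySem

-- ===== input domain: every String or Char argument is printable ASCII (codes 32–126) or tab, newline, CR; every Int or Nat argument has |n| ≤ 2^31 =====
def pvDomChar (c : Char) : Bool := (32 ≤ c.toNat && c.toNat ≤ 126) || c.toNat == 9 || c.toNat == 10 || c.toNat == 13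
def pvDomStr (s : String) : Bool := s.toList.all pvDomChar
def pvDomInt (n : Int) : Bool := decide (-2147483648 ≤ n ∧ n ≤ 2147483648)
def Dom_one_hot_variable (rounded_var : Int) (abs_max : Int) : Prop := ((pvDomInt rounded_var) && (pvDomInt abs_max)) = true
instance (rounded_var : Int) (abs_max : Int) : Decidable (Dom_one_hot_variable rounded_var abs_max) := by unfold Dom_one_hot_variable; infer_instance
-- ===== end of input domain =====

-- B replaces A's scan of range(-abs_max, abs_max+1) (early return + last-element fallback)
-- by a closed-form clamped index; objective: simpler.


-- ===== PORT A =====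
-- the 'for i, val in enumerate(range(-abs_max, abs_max+1))' loop with early return;
-- on loop exhaustion, vector[-1] = 1 (Python negative index = last element; Pre_ keeps vector nonempty)
def oneHotLoopA (rounded_var : Int) (vector : List Int) (i : Nat) (vals : List Int) : List Int :=
  match vals with
  | [] => vector.set (vector.length - 1) 1
  | v :: rest =>
      if rounded_var ≤ v then vector.set i 1
      else oneHotLoopA rounded_var vector (i + 1) rest

def one_hot_variable (rounded_var : Int) (abs_max : Int) : List Int :=
  let vector : List Int := List.replicate (abs_max * 2 + 1).toNat 0
  oneHotLoopA rounded_var vector 0 (PySem.List.pyRange (-abs_max) (abs_max + 1) 1)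

-- ===== PORT B =====
def one_hot_variable_alt (rounded_var : Int) (abs_max : Int) : List Int :=
  let vector : List Int := List.replicate (abs_max * 2 + 1).toNat 0
  let index : Int := max 0 (min (abs_max * 2) (rounded_var + abs_max))
  vector.set index.toNat 1

-- ===== PRECONDITION & SPEC =====
-- A raises IndexError (vector[-1] on an empty list / negative allocation) when abs_max < 0.
def Pre_one_hot_variable (rounded_var : Int) (abs_max : Int) : Prop := 0 ≤ abs_max
instance (rounded_var : Int) (abs_max : Int) : Decidable (Pre_one_hot_variable rounded_var abs_max) := by unfold Pre_one_hot_variable; infer_instance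
def pvWitness_one_hot_variable : Int × Int := (1, 2)

def Spec_one_hot_variable (rounded_var : Int) (abs_max : Int) (out : List Int) : Prop := out = one_hot_variable_alt rounded_var abs_max
instance (rounded_var : Int) (abs_max : Int) (out : List Int) : Decidable (Spec_one_hot_variable rounded_var abs_max out) := by unfold Spec_one_hot_variable; infer_instance

-- ===== CLAIM (what is proved, stated in full; the proofs are below) =====
def Claim_equal_one_hot_variable : Prop := ∀ (rounded_var : Int) (abs_max : Int), Dom_one_hot_variable rounded_var abs_max → Pre_one_hot_variable rounded_var abs_max → Spec_one_hot_variable rounded_var abs_max (one_hot_variable rounded_var abs_max)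

-- ===== LEMMAS AND PROOFS =====

-- closed form of the A-side loop on an ascending unit range
theorem oneHotLoopA_range (rounded_var : Int) :
    ∀ (n : Nat) (a : Int) (i : Nat) (vector : List Int),
      oneHotLoopA rounded_var vector i (PySem.List.pyRange a (a + n) 1) =
        if 0 < n ∧ rounded_var ≤ a + n - 1 then
          vector.set (i + (max 0 (rounded_var - a)).toNat) 1
        else vector.set (vector.length - 1) 1 := by
  intro n
  induction n with
  | zero =>
      intro a i vector
      simp [oneHotLoopA]
  | succ m ih =>
      intro a i vector
      rw [show a + ((m : Nat) + 1 : ℕ) = a + (m + 1 : ℤ) by push_cast; ring]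
      rw [PySem.List.pyRange_one_cons (by omega)]
      rw [oneHotLoopA]
      by_cases h : rounded_var ≤ a
      · rw [if_pos h]
        have : (max 0 (rounded_var - a)).toNat = 0 := by omega
        simp [h]
        omega
      · rw [if_neg h]
        have : a + (m + 1 : ℤ) = (a + 1) + (m : ℕ) := by push_cast; ring
        rw [this, ih]
        by_cases hm : 0 < m ∧ rounded_var ≤ a + 1 + (m : ℕ) - 1
        · rw [if_pos hm, if_pos (by push_cast at hm ⊢; omega)]
          congr 1
          omega
        · rw [if_neg hm, if_neg (by push_cast at hm ⊢; omega)]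

theorem one_hot_variable_spec : Claim_equal_one_hot_variable := by
  intro rounded_var abs_max _ hpre
  unfold Pre_one_hot_variable at hpre
  unfold Spec_one_hot_variable one_hot_variable one_hot_variable_alt
  have hn : ((abs_max + 1) : Int) = (-abs_max) + ((abs_max * 2 + 1).toNat : ℕ) := by omega
  rw [hn, oneHotLoopA_range]
  by_cases h : 0 < (abs_max * 2 + 1).toNat ∧ rounded_var ≤ -abs_max + ((abs_max * 2 + 1).toNat : ℕ) - 1
  · rw [if_pos h]
    congr 1
    omega
  · rw [if_neg h]
    simp only [List.length_replicate]
    congr 1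
    omega
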